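-- pv_equiv track=rewrite | github.com/MegaLodonn0/bedrock-code-assistant | utils/suggestions.py | get_best_match
-- ===== SOURCE A (Python) =====
-- from typing import List, Optional
--
-- def get_best_match(typed: str, options: List[str]) -> Optional[str]:
--     """
--     Get best matching option for typed text
--
--     Args:
--         typed: Text user typed (without /)
--         options: List of available options
--
--     Returns:
--         Best matching option or None
--     """
--     typed_lower = typed.lower()
--
--     # Exact match
--     for opt in options:
--         if opt.lower() == typed_lower:
--             return opt
--
--     # Prefix match (prioritize by position)
--     matches = []
--     for opt in options:
--         if opt.lower().startswith(typed_lower):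
--             matches.append(opt)
--
--     if matches:
--         # Return the shortest match (most specific)
--         return min(matches, key=len)
--
--     return None
-- ===== SOURCE B (Python) =====
-- from typing import List, Optional
--
-- def get_best_match(typed: str, options: List[str]) -> Optional[str]:
--     """Single-pass version: early-return the first exact match; otherwise keep
--     the earliest shortest prefix match in an accumulator."""
--     typed_lower = typed.lower()
--     best = None
--     for opt in options:
--         opt_lower = opt.lower()
--         if opt_lower == typed_lower:
--             return opt
--         if opt_lower.startswith(typed_lower) and (best is None or len(opt) < len(best)):
--             best = opt
--     return best
-- ===== Notes on version B (the rewrite author's own statement) =====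
-- stated objective: alternative
-- what changed: Replaced A's three phases (exact-match scan, building a prefix-match list, min(key=len) reduction) by a single loop that early-returns the first exact match and otherwise maintains one 'shortest so far' accumulator with a strict-'<' update (keeping the leftmost on length ties), so no intermediate list is built.
import Mathlib
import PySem

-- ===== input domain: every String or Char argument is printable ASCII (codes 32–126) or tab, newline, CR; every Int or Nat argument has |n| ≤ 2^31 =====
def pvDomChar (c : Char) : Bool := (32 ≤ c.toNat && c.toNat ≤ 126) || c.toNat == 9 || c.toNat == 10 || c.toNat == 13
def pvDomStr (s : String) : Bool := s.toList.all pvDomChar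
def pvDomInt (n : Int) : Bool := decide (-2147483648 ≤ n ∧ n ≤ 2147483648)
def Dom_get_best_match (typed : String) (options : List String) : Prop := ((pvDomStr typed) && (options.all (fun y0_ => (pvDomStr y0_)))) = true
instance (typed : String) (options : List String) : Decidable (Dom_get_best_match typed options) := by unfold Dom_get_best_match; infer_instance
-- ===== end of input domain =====

-- B replaces A's exact-scan + prefix-list + min(key=len) reduction with one accumulator pass (alternative decomposition, same cost class).

-- ===== PORT A =====
-- the first 'for opt in options: if opt.lower() == typed_lower: return opt' loop
def pvAExact (tl : String) : List String → Option String
  | [] => none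
  | o :: os => if PySem.Str.lower o == tl then some o else pvAExact tl os

def get_best_match (typed : String) (options : List String) : Option String :=
  let typed_lower := PySem.Str.lower typed
  match pvAExact typed_lower options with
  | some o => some o
  | none =>
    -- ms = []; for opt in options: if opt.lower().startswith(typed_lower): ms.append(opt)
    let ms := options.foldl
      (fun acc opt => if PySem.Str.startswith (PySem.Str.lower opt) typed_lower then acc ++ [opt] else acc) []
    -- if ms: return min(ms, key=len)  (first minimum); return None
    if ms ≠ [] then PySem.List.min? ms (fun s => PySem.Str.len s) else none

-- ===== PORT B =====
-- the single loop of Source B: early return on exact match, 'best' accumulator for shortest prefix match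
def pvBLoop (tl : String) (best : Option String) : List String → Option String
  | [] => best
  | opt :: rest =>
    let opt_lower := PySem.Str.lower opt
    if opt_lower == tl then some opt
    else
      let best' :=
        if PySem.Str.startswith opt_lower tl &&
           (match best with
            | none => true
            | some b => decide (PySem.Str.len opt < PySem.Str.len b))
        then some opt else best
      pvBLoop tl best' rest

def get_best_match_alt (typed : String) (options : List String) : Option String :=
  pvBLoop (PySem.Str.lower typed) none options

-- ===== PRECONDITION & SPEC =====
def Spec_get_best_match (typed : String) (options : List String) (out : Option String) : Prop := out = get_best_match_alt typed options
instance (typed : String) (options : List String) (out : Option String) : Decidable (Spec_get_best_match typed options out) := by unfold Spec_get_best_match; infer_instance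

-- ===== CLAIM (what is proved, stated in full; the proofs are below) =====
def Claim_equal_get_best_match : Prop := ∀ (typed : String) (options : List String), Dom_get_best_match typed options → Spec_get_best_match typed options (get_best_match typed options)

-- ===== LEMMAS AND PROOFS =====

-- the folding step of PySem.List.min? with key = len (also B's accumulator update)
def pvMinStep : Option String → String → Option String
  | none, x => some x
  | some m, x => if PySem.Str.len x < PySem.Str.len m then some x else some m

theorem pvBLoop_eq (tl : String) (os : List String) (best : Option String) :
    pvBLoop tl best os =
      match pvAExact tl os with
      | some o => some o
      | none => List.foldl pvMinStep best
          (os.filter (fun o => PySem.Str.startswith (PySem.Str.lower o) tl)) := by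
  induction os generalizing best with
  | nil => simp [pvBLoop, pvAExact]
  | cons o os ih =>
    simp only [pvBLoop, pvAExact]
    by_cases h : (PySem.Str.lower o == tl) = true
    · rw [if_pos h, if_pos h]
    · rw [if_neg h, if_neg h, ih]
      cases pvAExact tl os with
      | some o' => rfl
      | none =>
        simp only [List.filter_cons]
        by_cases hp : PySem.Str.startswith (PySem.Str.lower o) tl = true
        · rw [if_pos hp, List.foldl_cons]
          have hstep : (if (PySem.Str.startswith (PySem.Str.lower o) tl &&
              (match best with
               | none => true
               | some b => decide (PySem.Str.len o < PySem.Str.len b))) = true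
              then some o else best) = pvMinStep best o := by
            cases best with
            | none => simp only [hp, Bool.true_and, if_true, pvMinStep]
            | some b =>
              simp only [hp, Bool.true_and, decide_eq_true_eq, pvMinStep]
          rw [hstep]
        · have hp' : PySem.Str.startswith (PySem.Str.lower o) tl = false := by
            revert hp; cases PySem.Str.startswith (PySem.Str.lower o) tl <;> simp
          rw [if_neg hp]
          simp only [hp', Bool.false_and, Bool.false_eq_true, if_false]

theorem pvA_eq (tl : String) (os : List String) :
    (match pvAExact tl os with
     | some o => some o
     | none =>
       let ms := os.foldl
         (fun acc opt => if PySem.Str.startswith (PySem.Str.lower opt) tl then acc ++ [opt] else acc) []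
       if ms ≠ [] then PySem.List.min? ms (fun s => PySem.Str.len s) else none) =
      (match pvAExact tl os with
       | some o => some o
       | none => List.foldl pvMinStep none
           (os.filter (fun o => PySem.Str.startswith (PySem.Str.lower o) tl))) := by
  cases pvAExact tl os with
  | some o => rfl
  | none =>
    simp only []
    have hfold : os.foldl
        (fun acc opt => if PySem.Str.startswith (PySem.Str.lower opt) tl then acc ++ [opt] else acc) []
        = os.filter (fun o => PySem.Str.startswith (PySem.Str.lower o) tl) := by
      simpa using PySem.List.foldl_append_if_eq_filter
        (fun o => PySem.Str.startswith (PySem.Str.lower o) tl) os []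
    rw [hfold]
    set f := os.filter (fun o => PySem.Str.startswith (PySem.Str.lower o) tl) with hf
    by_cases hne : f = []
    · simp [hne]
    · simp only [hne, ne_eq, not_false_eq_true, if_true]
      show PySem.List.min? f (fun s => PySem.Str.len s) = List.foldl pvMinStep none f
      unfold PySem.List.min?
      congr 1
      funext acc x
      cases acc <;> simp [pvMinStep]

-- ===== VERDICT (by name: the statement is the Claim_ definition above) =====
theorem get_best_match_spec : Claim_equal_get_best_match := by
  intro typed options _
  unfold Spec_get_best_match get_best_match get_best_match_alt
  rw [pvBLoop_eq]
  exact pvA_eq (PySem.Str.lower typed) options
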